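-- pv_equiv track=rewrite | github.com/heroxdream/Leetcode | src/string/regularExpressionMatching.py | compile_pattern
-- ===== SOURCE A (Python) =====
-- dot = '.'
--
-- asterisk = '*'
--
-- def compile_pattern(pattern):
--     rules = []
--     seq = []
--     for i in range(len(pattern)):
--         char = pattern[i]
--         if isChar(char):
--             seq.append(char)
--         elif isAsterisk(char):
--             last_char = seq.pop()
--             r1 = ''.join(seq)
--             r2 = last_char + asterisk
--             rules.append(r1) if len(r1) > 0 else 1
--             rules.append(r2)
--             seq = []
--         else:
--             if i + 1 < len(pattern) and pattern[i + 1] == asterisk: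
--                 seq.append(char)
--                 continue
--             r1 = ''.join(seq)
--             r2 = dot
--             rules.append(r1) if len(r1) > 0 else 1
--             rules.append(r2)
--             seq = []
--     rules.append(''.join(seq)) if len(seq) > 0 else 1
--     return rules
--
-- def isAsterisk(c):
--     return c == asterisk
--
-- def isChar(c):
--     return c != dot and c != asterisk
-- ===== SOURCE B (Python) =====
-- def compile_pattern(pattern):
--     rules = []
--     run = []
--     i = 0
--     n = len(pattern)
--     while i < n:
--         c = pattern[i]
--         if i + 1 < n and pattern[i + 1] == '*':
--             if run:
--                 rules.append(''.join(run))
--             rules.append(c + '*')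
--             run = []
--             i += 2
--         elif c == '.':
--             if run:
--                 rules.append(''.join(run))
--             rules.append('.')
--             run = []
--             i += 1
--         elif c == '*':
--             i += 1
--         else:
--             run.append(c)
--             i += 1
--     if run:
--         rules.append(''.join(run))
--     return rules
-- ===== Notes on version B (the rewrite author's own statement) =====
-- stated objective: simpler
-- what changed: Replaces A's append-then-pop run buffer (push char, then pop it back when the '*' is seen) by a forward-lookahead tokenizer that flushes the run and consumes the char and its '*' together, never popping from the buffer.
import Mathlib
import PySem

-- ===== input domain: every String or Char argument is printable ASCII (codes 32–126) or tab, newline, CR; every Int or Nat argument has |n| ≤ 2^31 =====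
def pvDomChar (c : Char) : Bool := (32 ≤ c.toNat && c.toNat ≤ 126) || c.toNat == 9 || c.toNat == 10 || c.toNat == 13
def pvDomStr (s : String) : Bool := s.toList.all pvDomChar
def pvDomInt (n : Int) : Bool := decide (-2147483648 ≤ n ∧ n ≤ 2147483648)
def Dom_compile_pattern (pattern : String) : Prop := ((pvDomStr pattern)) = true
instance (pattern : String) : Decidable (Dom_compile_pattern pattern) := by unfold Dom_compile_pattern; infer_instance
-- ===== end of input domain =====

-- B replaces A's append-then-pop buffer loop by a forward-lookahead tokenizer that
-- skips the '*' instead of popping; objective: simpler/idiomatic, same cost.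

-- ===== PORT A =====
-- A's for-loop over indices, state (seq, rules).  seq.pop() on empty seq is an
-- IndexError in Python; Pre_ excludes those inputs, here getLast?/dropLast give junk.
def compile_pattern_go (cs : List Char) (i : Nat) (seq : List Char) (rules : List String) : List String :=
  if h : i < cs.length then
    let c := cs.getD i ' '
    if c ≠ '.' ∧ c ≠ '*' then
      compile_pattern_go cs (i+1) (seq ++ [c]) rules
    else if c = '*' then
      let last_char := (seq.getLast?).getD ' '        -- seq.pop(): IndexError on [] is outside Pre_
      let rest := seq.dropLast
      compile_pattern_go cs (i+1) []
        (rules ++ (if rest.length > 0 then [String.mk rest] else []) ++ [String.mk [last_char, '*']])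
    else
      if i + 1 < cs.length ∧ cs.getD (i+1) ' ' = '*' then
        compile_pattern_go cs (i+1) (seq ++ [c]) rules
      else
        compile_pattern_go cs (i+1) []
          (rules ++ (if seq.length > 0 then [String.mk seq] else []) ++ [String.mk ['.']])
  else
    rules ++ (if seq.length > 0 then [String.mk seq] else [])
termination_by cs.length - i
decreasing_by all_goals omega

def compile_pattern (pattern : String) : List String :=
  compile_pattern_go pattern.toList 0 [] []

-- ===== PORT B =====
-- B's while-loop with explicit index and run buffer, lookahead for '*'.
def compile_pattern_alt_go (cs : List Char) (i : Nat) (run : List Char) (rules : List String) : List String :=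
  if h : i < cs.length then
    let c := cs.getD i ' '
    if i + 1 < cs.length ∧ cs.getD (i+1) ' ' = '*' then
      compile_pattern_alt_go cs (i+2) []
        (rules ++ (if run ≠ [] then [String.mk run] else []) ++ [String.mk [c, '*']])
    else if c = '.' then
      compile_pattern_alt_go cs (i+1) []
        (rules ++ (if run ≠ [] then [String.mk run] else []) ++ [String.mk ['.']])
    else if c = '*' then
      compile_pattern_alt_go cs (i+1) run rules
    else
      compile_pattern_alt_go cs (i+1) (run ++ [c]) rules
  else
    rules ++ (if run ≠ [] then [String.mk run] else [])
termination_by cs.length - i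
decreasing_by all_goals omega

def compile_pattern_alt (pattern : String) : List String :=
  compile_pattern_alt_go pattern.toList 0 [] []

-- ===== PRECONDITION & SPEC =====
-- Pre_ excludes patterns with an orphan '*' (at position 0 or right after another '*'),
-- on which A's seq.pop() raises IndexError.
def Pre_compile_pattern (pattern : String) : Prop :=
  ∀ i ∈ List.range pattern.toList.length,
    pattern.toList.getD i ' ' = '*' → 0 < i ∧ pattern.toList.getD (i-1) ' ' ≠ '*'
instance (pattern : String) : Decidable (Pre_compile_pattern pattern) := by
  unfold Pre_compile_pattern; infer_instance

def pvWitness_compile_pattern : String := "ab*c.d.*"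

def Spec_compile_pattern (pattern : String) (out : List String) : Prop := out = compile_pattern_alt pattern
instance (pattern : String) (out : List String) : Decidable (Spec_compile_pattern pattern out) := by unfold Spec_compile_pattern; infer_instance

-- ===== CLAIM (what is proved, stated in full; the proofs are below) =====
def Claim_equal_compile_pattern : Prop := ∀ (pattern : String), Dom_compile_pattern pattern → Pre_compile_pattern pattern → Spec_compile_pattern pattern (compile_pattern pattern)

-- ===== LEMMAS AND PROOFS =====

-- No-orphan-'*' condition on the raw char list.
def PreL (cs : List Char) : Prop :=
  ∀ i, i < cs.length → cs.getD i ' ' = '*' → 0 < i ∧ cs.getD (i-1) ' ' ≠ '*'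

theorem preL_of_pre (pattern : String) (h : Pre_compile_pattern pattern) : PreL pattern.toList := by
  intro i hi hstar
  exact h i (List.mem_range.mpr hi) hstar

-- Main loop equivalence: starting at a position whose char is not '*',
-- A's append-then-pop loop and B's lookahead loop produce the same rules.
theorem go_eq (cs : List Char) (hpre : PreL cs) :
    ∀ k i seq rules, k = cs.length - i →
    (i < cs.length → cs.getD i ' ' ≠ '*') →
    compile_pattern_go cs i seq rules = compile_pattern_alt_go cs i seq rules := by
  intro k
  induction k using Nat.strong_induction_on with
  | _ k ih =>
    intro i seq rules hk hcur
    by_cases hi : i < cs.length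
    · have hcur' := hcur hi
      by_cases hla : i + 1 < cs.length ∧ cs.getD (i+1) ' ' = '*'
      · -- pair move: A appends c then pops it at the '*'
        have hnext : i + 2 < cs.length → cs.getD (i+2) ' ' ≠ '*' := by
          intro h2 hst
          exact (hpre (i+2) h2 hst).2 hla.2
        have hA1 : compile_pattern_go cs i seq rules
            = compile_pattern_go cs (i+1) (seq ++ [cs.getD i ' ']) rules := by
          rw [compile_pattern_go]
          simp only [hi, dite_true]
          have hstar1 : cs[i+1] = '*' := by
            simpa [List.getD_eq_getElem?_getD, List.getElem?_eq_getElem hla.1] using hla.2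
          by_cases hc : cs.getD i ' ' ≠ '.' ∧ cs.getD i ' ' ≠ '*'
          · have hc0 : ¬cs[i]?.getD ' ' = '.' ∧ ¬cs[i]?.getD ' ' = '*' := by
              simpa [List.getD_eq_getElem?_getD] using hc
            simp [hc0]
          · -- then c = '.', since c ≠ '*'
            have hdot : cs.getD i ' ' = '.' := by
              by_contra hd
              exact hc ⟨hd, hcur'⟩
            have hdot0 : cs[i]?.getD ' ' = '.' := by
              simpa [List.getD_eq_getElem?_getD] using hdot
            simp [hdot0, hla.1, hstar1]
        have hA2 : compile_pattern_go cs (i+1) (seq ++ [cs.getD i ' ']) rules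
            = compile_pattern_go cs (i+2) []
                (rules ++ (if seq.length > 0 then [String.mk seq] else [])
                  ++ [String.mk [cs.getD i ' ', '*']]) := by
          rw [compile_pattern_go]
          have hstar : cs[i+1] = '*' := by
            simpa [List.getD_eq_getElem?_getD, List.getElem?_eq_getElem hla.1] using hla.2
          simp [hla.1, hstar]
        have hB : compile_pattern_alt_go cs i seq rules
            = compile_pattern_alt_go cs (i+2) []
                (rules ++ (if seq ≠ [] then [String.mk seq] else [])
                  ++ [String.mk [cs.getD i ' ', '*']]) := by
          rw [compile_pattern_alt_go]
          have hstar1 : cs[i+1] = '*' := by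
            simpa [List.getD_eq_getElem?_getD, List.getElem?_eq_getElem hla.1] using hla.2
          simp [hi, hla.1, hstar1]
        have hguard : (if seq.length > 0 then [String.mk seq] else [])
            = (if seq ≠ [] then [String.mk seq] else []) := by
          cases seq <;> simp
        rw [hA1, hA2, hB, hguard]
        exact ih (cs.length - (i+2)) (by omega) (i+2) _ _ rfl hnext
      · -- single move
        have hnext : i + 1 < cs.length → cs.getD (i+1) ' ' ≠ '*' := by
          intro h1 hst
          exact hla ⟨h1, hst⟩
        have hguard : (if seq.length > 0 then [String.mk seq] else [])
            = (if seq ≠ [] then [String.mk seq] else []) := by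
          cases seq <;> simp
        by_cases hdot : cs.getD i ' ' = '.'
        · have hla0 : ¬(i + 1 < cs.length ∧ cs[i+1]?.getD ' ' = '*') := by
            simpa [List.getD_eq_getElem?_getD] using hla
          have hdot0 : cs[i] = '.' := by
            simpa [List.getD_eq_getElem?_getD, List.getElem?_eq_getElem hi] using hdot
          have hA : compile_pattern_go cs i seq rules
              = compile_pattern_go cs (i+1) []
                  (rules ++ (if seq.length > 0 then [String.mk seq] else []) ++ [String.mk ['.']]) := by
            rw [compile_pattern_go]
            simp [hi, hdot0, hla0]
          have hB : compile_pattern_alt_go cs i seq rules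
              = compile_pattern_alt_go cs (i+1) []
                  (rules ++ (if seq ≠ [] then [String.mk seq] else []) ++ [String.mk ['.']]) := by
            have hla' : ¬(i + 1 < cs.length ∧ cs[i+1]?.getD ' ' = '*') := by
              simpa [List.getD_eq_getElem?_getD] using hla
            have hdot' : cs[i] = '.' := by
              simpa [List.getD_eq_getElem?_getD, List.getElem?_eq_getElem hi] using hdot
            rw [compile_pattern_alt_go]
            simp [hi, hdot', hla']
          rw [hA, hB, hguard]
          exact ih (cs.length - (i+1)) (by omega) (i+1) _ _ rfl hnext
        · -- ordinary char
          have hla' : ¬(i + 1 < cs.length ∧ cs[i+1]?.getD ' ' = '*') := by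
            simpa [List.getD_eq_getElem?_getD] using hla
          have hdot' : cs[i] ≠ '.' := by
            simpa [List.getD_eq_getElem?_getD, List.getElem?_eq_getElem hi] using hdot
          have hstar' : cs[i] ≠ '*' := by
            simpa [List.getD_eq_getElem?_getD, List.getElem?_eq_getElem hi] using hcur'
          have hA : compile_pattern_go cs i seq rules
              = compile_pattern_go cs (i+1) (seq ++ [cs.getD i ' ']) rules := by
            rw [compile_pattern_go]
            simp [hi, hdot', hstar', List.getD_eq_getElem?_getD, List.getElem?_eq_getElem hi]
          have hB : compile_pattern_alt_go cs i seq rules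
              = compile_pattern_alt_go cs (i+1) (seq ++ [cs.getD i ' ']) rules := by
            rw [compile_pattern_alt_go]
            simp [hi, hla', hdot', hstar', List.getD_eq_getElem?_getD, List.getElem?_eq_getElem hi]
          rw [hA, hB]
          exact ih (cs.length - (i+1)) (by omega) (i+1) _ _ rfl hnext
    · rw [compile_pattern_go, compile_pattern_alt_go]
      have hguard : (if seq.length > 0 then [String.mk seq] else [])
          = (if seq ≠ [] then [String.mk seq] else []) := by
        cases seq <;> simp
      simp [hi, hguard]

-- ===== VERDICT (by name: the statement is the Claim_ definition above) =====
theorem compile_pattern_spec : Claim_equal_compile_pattern := by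
  intro pattern _ hpre
  unfold Spec_compile_pattern compile_pattern compile_pattern_alt
  have hpl := preL_of_pre pattern hpre
  refine go_eq pattern.toList hpl (pattern.toList.length) 0 [] [] (by omega) ?_
  intro h0 hst
  have := hpl 0 h0 hst
  omega
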